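-- pv_equiv track=rewrite | github.com/HeYuJie2019/bestway | install/sbus_control/lib/python3.10/site-packages/sbus_control/ws2812_led_node.py | build_block_pattern
-- ===== SOURCE A (Python) =====
-- from typing import List, Sequence, Tuple
--
-- Pixel = Tuple[int, int, int]
--
-- def build_block_pattern(count: int, color_a: Pixel, color_b: Pixel, block_size: int, phase: int) -> list[Pixel]:
--     bs = max(1, int(block_size))
--     out: list[Pixel] = []
--     toggle = phase & 1
--     i = 0
--     while i < count:
--         color = color_b if toggle else color_a
--         run = min(bs, count - i)
--         out.extend([color] * run)
--         i += run
--         toggle ^= 1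
--     return out
-- ===== SOURCE B (Python) =====
-- def build_block_pattern(count, color_a, color_b, block_size, phase):
--     bs = max(1, int(block_size))
--     return [color_b if ((phase + i // bs) & 1) else color_a for i in range(count)]
-- ===== Notes on version B (the rewrite author's own statement) =====
-- stated objective: idiomatic
-- what changed: Replaces the while-loop that maintains a mutable toggle flag and fills runs of length bs with a single per-pixel comprehension that computes each pixel's color independently from its block index i // bs.
import Mathlib
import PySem

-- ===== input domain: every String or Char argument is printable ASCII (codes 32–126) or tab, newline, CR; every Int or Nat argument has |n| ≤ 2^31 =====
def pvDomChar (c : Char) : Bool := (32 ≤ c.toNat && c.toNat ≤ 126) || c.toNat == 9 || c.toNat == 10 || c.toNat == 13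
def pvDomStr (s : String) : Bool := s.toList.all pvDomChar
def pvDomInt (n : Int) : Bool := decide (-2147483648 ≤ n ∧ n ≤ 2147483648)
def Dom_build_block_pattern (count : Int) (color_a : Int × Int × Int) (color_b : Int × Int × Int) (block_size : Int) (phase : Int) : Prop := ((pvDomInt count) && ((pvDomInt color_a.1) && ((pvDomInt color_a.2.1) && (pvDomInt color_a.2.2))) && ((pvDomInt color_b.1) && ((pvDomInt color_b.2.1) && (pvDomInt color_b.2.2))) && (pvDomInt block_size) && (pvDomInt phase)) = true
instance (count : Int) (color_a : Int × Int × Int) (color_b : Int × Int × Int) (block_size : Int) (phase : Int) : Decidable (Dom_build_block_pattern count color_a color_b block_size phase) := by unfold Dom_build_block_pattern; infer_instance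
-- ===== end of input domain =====

-- B replaces A's run-filling while-loop with a mutable toggle by a per-pixel
-- comprehension computing each color from the block index i // bs (idiomatic, same cost).


-- ===== PORT A =====
-- while i < count: pick color from toggle, fill a run of min(bs, count-i), flip toggle.
-- hbs (1 ≤ bs) is a totality guard only: A computes bs = max(1, block_size) before the loop.
def blockLoopA (color_a color_b : Int × Int × Int) (bs : Int) (hbs : 1 ≤ bs)
    (count : Int) (toggle i : Int) (out : List (Int × Int × Int)) : List (Int × Int × Int) :=
  if _h : i < count then
    blockLoopA color_a color_b bs hbs count (PySem.Int.bxor toggle 1)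
      (i + min bs (count - i))
      (out ++ List.replicate (min bs (count - i)).toNat
        (if toggle ≠ 0 then color_b else color_a))
  else out
termination_by (count - i).toNat
decreasing_by omega

def build_block_pattern (count : Int) (color_a : Int × Int × Int) (color_b : Int × Int × Int) (block_size : Int) (phase : Int) : List (Int × Int × Int) :=
  blockLoopA color_a color_b (max 1 block_size) (le_max_left 1 block_size) count
    (PySem.Int.band phase 1) 0 []

-- ===== PORT B =====
def build_block_pattern_alt (count : Int) (color_a : Int × Int × Int) (color_b : Int × Int × Int) (block_size : Int) (phase : Int) : List (Int × Int × Int) :=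
  let bs := max 1 block_size
  (PySem.List.pyRange 0 count 1).map (fun i =>
    if PySem.Int.band (phase + PySem.Int.floordiv i bs) 1 ≠ 0 then color_b else color_a)

-- ===== PRECONDITION & SPEC =====
def Spec_build_block_pattern (count : Int) (color_a : Int × Int × Int) (color_b : Int × Int × Int) (block_size : Int) (phase : Int) (out : List (Int × Int × Int)) : Prop := out = build_block_pattern_alt count color_a color_b block_size phase
instance (count : Int) (color_a : Int × Int × Int) (color_b : Int × Int × Int) (block_size : Int) (phase : Int) (out : List (Int × Int × Int)) : Decidable (Spec_build_block_pattern count color_a color_b block_size phase out) := by unfold Spec_build_block_pattern; infer_instance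

-- ===== CLAIM (what is proved, stated in full; the proofs are below) =====
def Claim_equal_build_block_pattern : Prop := ∀ (count : Int) (color_a : Int × Int × Int) (color_b : Int × Int × Int) (block_size : Int) (phase : Int), Dom_build_block_pattern count color_a color_b block_size phase → Spec_build_block_pattern count color_a color_b block_size phase (build_block_pattern count color_a color_b block_size phase)

-- ===== LEMMAS AND PROOFS =====

-- (x & 1) ^ 1 = (x + 1) & 1
lemma bxor_band_one (x : Int) :
    PySem.Int.bxor (PySem.Int.band x 1) 1 = PySem.Int.band (x + 1) 1 := by
  rw [PySem.Int.band_one, PySem.Int.band_one]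
  rw [PySem.Int.mod_eq_emod_of_pos (by norm_num), PySem.Int.mod_eq_emod_of_pos (by norm_num)]
  rcases Int.emod_two_eq x with h | h
  · have h1 : (x + 1) % 2 = 1 := by omega
    rw [h, h1]; decide
  · have h1 : (x + 1) % 2 = 0 := by omega
    rw [h, h1]; decide

-- within one block [bs*q, bs*(q+1)), B's per-pixel formula is constant
lemma map_block_const (color_a color_b : Int × Int × Int) (bs phase q : Int) (hbs : 1 ≤ bs)
    (a b : Int) (ha : bs * q ≤ a) (hb : b ≤ bs * (q + 1)) :
    (PySem.List.pyRange a b 1).map (fun i =>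
        if PySem.Int.band (phase + PySem.Int.floordiv i bs) 1 ≠ 0 then color_b else color_a)
      = List.replicate (b - a).toNat
        (if PySem.Int.band (phase + q) 1 ≠ 0 then color_b else color_a) := by
  rw [List.eq_replicate_iff]
  constructor
  · rw [List.length_map, PySem.List.length_pyRange_one]
  · intro y hy
    rcases List.mem_map.mp hy with ⟨i, hi, rfl⟩
    rw [PySem.List.mem_pyRange_one] at hi
    have hq : PySem.Int.floordiv i bs = q := by
      rw [PySem.Int.floordiv_eq_iff_of_pos (by omega)]
      have e1 : q * bs = bs * q := by ring
      have e2 : (q + 1) * bs = bs * (q + 1) := by ring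
      omega
    rw [hq]

lemma blockLoopA_stop (color_a color_b : Int × Int × Int) (bs : Int) (hbs : 1 ≤ bs)
    (count toggle i : Int) (out : List (Int × Int × Int)) (h : ¬ i < count) :
    blockLoopA color_a color_b bs hbs count toggle i out = out := by
  rw [blockLoopA]; simp [h]

lemma blockLoopA_eq (color_a color_b : Int × Int × Int) (bs : Int) (hbs : 1 ≤ bs)
    (count phase : Int) :
    ∀ (n : Nat) (q : Int) (out : List (Int × Int × Int)), (count - bs * q).toNat ≤ n →
    blockLoopA color_a color_b bs hbs count (PySem.Int.band (phase + q) 1) (bs * q) out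
      = out ++ (PySem.List.pyRange (bs * q) count 1).map (fun i =>
          if PySem.Int.band (phase + PySem.Int.floordiv i bs) 1 ≠ 0 then color_b else color_a) := by
  intro n
  induction n with
  | zero =>
    intro q out hn
    have hc : count ≤ bs * q := by omega
    rw [blockLoopA_stop _ _ _ _ _ _ _ _ (by omega),
      PySem.List.pyRange_one_eq_nil hc, List.map_nil, List.append_nil]
  | succ n ih =>
    intro q out hn
    by_cases h : bs * q < count
    · rw [blockLoopA, dif_pos h]
      by_cases hr : bs ≤ count - bs * q
      · -- full block: run = bs, recurse at block q+1
        have hmin : min bs (count - bs * q) = bs := by omega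
        rw [hmin, bxor_band_one]
        have hstep : bs * q + bs = bs * (q + 1) := by ring
        have hph : phase + q + 1 = phase + (q + 1) := by ring
        have hb1 : bs * (q + 1) = bs * q + bs := by ring
        rw [hstep, hph, ih (q + 1) _ (by omega)]
        rw [PySem.List.pyRange_one_append (bs * q) (bs * (q + 1)) count
          (by omega) (by omega), List.map_append, List.append_assoc]
        rw [map_block_const color_a color_b bs phase q hbs _ _ le_rfl le_rfl]
        have : (bs * (q + 1) - bs * q).toNat = bs.toNat := by omega
        rw [this]
      · -- final partial block: run = count - bs*q, loop ends
        have hmin : min bs (count - bs * q) = count - bs * q := by omega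
        rw [hmin]
        have hend : bs * q + (count - bs * q) = count := by ring
        rw [hend, blockLoopA_stop _ _ _ _ _ _ _ _ (lt_irrefl count)]
        have hb1 : bs * (q + 1) = bs * q + bs := by ring
        rw [map_block_const color_a color_b bs phase q hbs _ _ le_rfl (by omega)]
    · rw [blockLoopA_stop _ _ _ _ _ _ _ _ h,
        PySem.List.pyRange_one_eq_nil (by omega), List.map_nil, List.append_nil]

-- ===== VERDICT (by name: the statement is the Claim_ definition above) =====
theorem build_block_pattern_spec : Claim_equal_build_block_pattern := by
  intro count color_a color_b block_size phase _
  unfold Spec_build_block_pattern build_block_pattern build_block_pattern_alt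
  have h := blockLoopA_eq color_a color_b (max 1 block_size) (le_max_left 1 block_size)
    count phase (count - (max 1 block_size) * 0).toNat 0 [] le_rfl
  simpa using h
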